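-- pv_equiv track=rewrite | github.com/Altelus1/Hacking_Adventures | Cryptopals/Set1/detect_single_xor.py | score_it
-- ===== SOURCE A (Python) =====
-- def score_it(string):
--
-- 	score = 0
--
-- 	for char in string:
-- 		if ord(char) == 32:
-- 			score += 1
-- 		elif (ord(char) >=65 and ord(char) <=90) or (ord(char) >= 97 and ord(char) <= 122):
-- 			score += 2
-- 		elif ord(char) < 32 or ord(char) > 122:
-- 			score -= 3
--
-- 	return score
-- ===== SOURCE B (Python) =====
-- def score_it(string):
--     spaces = sum(1 for c in string if c == ' ')
--     letters = sum(1 for c in string if 'A' <= c <= 'Z' or 'a' <= c <= 'z')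
--     bad = sum(1 for c in string if ord(c) < 32 or ord(c) > 122)
--     return spaces + 2 * letters - 3 * bad
-- ===== Notes on version B (the rewrite author's own statement) =====
-- stated objective: simpler
-- what changed: Replaces the single if/elif accumulation loop with three independent class counts (spaces, ASCII letters, out-of-range chars) combined by the closed-form expression spaces + 2*letters - 3*bad, valid because the classes are disjoint.
import Mathlib
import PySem

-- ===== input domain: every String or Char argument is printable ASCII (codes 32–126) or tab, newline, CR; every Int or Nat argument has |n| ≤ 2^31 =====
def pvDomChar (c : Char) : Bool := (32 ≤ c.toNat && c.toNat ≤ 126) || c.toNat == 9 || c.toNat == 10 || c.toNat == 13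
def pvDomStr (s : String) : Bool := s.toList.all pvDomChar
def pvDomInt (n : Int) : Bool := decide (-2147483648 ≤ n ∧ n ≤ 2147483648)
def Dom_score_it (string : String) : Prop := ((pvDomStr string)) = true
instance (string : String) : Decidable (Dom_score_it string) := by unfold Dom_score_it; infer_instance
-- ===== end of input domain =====

-- B replaces A's single if/elif accumulation loop with three independent class
-- counts combined arithmetically (the classes are disjoint), for simplicity.

-- ===== PORT A =====
def score_it (string : String) : Int :=
  string.toList.foldl (fun score char =>
    if char.toNat = 32 then score + 1
    else if (65 ≤ char.toNat ∧ char.toNat ≤ 90) ∨ (97 ≤ char.toNat ∧ char.toNat ≤ 122) then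
      score + 2
    else if char.toNat < 32 ∨ 122 < char.toNat then score - 3
    else score) 0

-- ===== PORT B =====
def score_it_alt (string : String) : Int :=
  let spaces : Int := string.toList.countP (fun c => c = ' ')
  let letters : Int := string.toList.countP (fun c => ('A' ≤ c ∧ c ≤ 'Z') ∨ ('a' ≤ c ∧ c ≤ 'z'))
  let bad : Int := string.toList.countP (fun c => c.toNat < 32 ∨ 122 < c.toNat)
  spaces + 2 * letters - 3 * bad

-- ===== PRECONDITION & SPEC =====
def Spec_score_it (string : String) (out : Int) : Prop := out = score_it_alt string
instance (string : String) (out : Int) : Decidable (Spec_score_it string out) := by unfold Spec_score_it; infer_instance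

-- ===== CLAIM (what is proved, stated in full; the proofs are below) =====
def Claim_equal_score_it : Prop := ∀ (string : String), Dom_score_it string → Spec_score_it string (score_it string)

-- ===== LEMMAS AND PROOFS =====
theorem score_it_key (l : List Char) (a : Int) :
    l.foldl (fun score char =>
      if char.toNat = 32 then score + 1
      else if (65 ≤ char.toNat ∧ char.toNat ≤ 90) ∨ (97 ≤ char.toNat ∧ char.toNat ≤ 122) then
        score + 2
      else if char.toNat < 32 ∨ 122 < char.toNat then score - 3
      else score) a
    = a + (l.countP (fun c => c = ' ') : Int)
        + 2 * (l.countP (fun c => ('A' ≤ c ∧ c ≤ 'Z') ∨ ('a' ≤ c ∧ c ≤ 'z')) : Int)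
        - 3 * (l.countP (fun c => c.toNat < 32 ∨ 122 < c.toNat) : Int) := by
  induction l generalizing a with
  | nil => simp
  | cons c l ih =>
    simp only [List.foldl_cons, List.countP_cons, ih]
    have hs : (c = ' ') ↔ c.toNat = 32 := by
      rw [Char.ext_iff, UInt32.ext_iff, Char.toNat]
      show c.val.toNat = 32 ↔ _
      constructor <;> intro h <;> omega
    have hA : ('A' ≤ c ∧ c ≤ 'Z') ↔ (65 ≤ c.toNat ∧ c.toNat ≤ 90) := by
      rw [Char.le_def, Char.le_def, UInt32.le_iff_toNat_le, UInt32.le_iff_toNat_le]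
      exact Iff.rfl
    have ha : ('a' ≤ c ∧ c ≤ 'z') ↔ (97 ≤ c.toNat ∧ c.toNat ≤ 122) := by
      rw [Char.le_def, Char.le_def, UInt32.le_iff_toNat_le, UInt32.le_iff_toNat_le]
      exact Iff.rfl
    simp only [decide_eq_true_eq, hs, hA, ha]
    split_ifs <;> push_cast <;> omega

-- ===== VERDICT (by name: the statement is the Claim_ definition above) =====
theorem score_it_spec : Claim_equal_score_it := by
  intro s _
  unfold Spec_score_it score_it score_it_alt
  rw [score_it_key]
  push_cast
  ring
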